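-- pv_equiv track=rewrite | github.com/git-hyunwoo/CodingInterview | 프로그래머스/unrated/181926. 수 조작하기 1/수 조작하기 1.py | solution
-- ===== SOURCE A (Python) =====
-- def solution(n, control):
--     answer = 0
--
--     for direction in control:
--
--         if direction == 'w':
--             n += 1
--         elif direction == 's':
--             n += -1
--         elif direction == 'd':
--             n += 10
--         elif direction == 'a':
--             n += -10
--         else:
--             raise Exception("경고 : 입력은 w,s,d,a 범위 내에서만 가능합니다.")
--
--     answer = n
--
--     return answer
-- ===== SOURCE B (Python) =====
-- def solution(n, control):
--     if set(control) - {'w', 's', 'd', 'a'}: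
--         raise Exception("경고 : 입력은 w,s,d,a 범위 내에서만 가능합니다.")
--     return (n + control.count('w') - control.count('s')
--             + 10 * control.count('d') - 10 * control.count('a'))
-- ===== Notes on version B (the rewrite author's own statement) =====
-- stated objective: idiomatic
-- what changed: Replaces the per-character branch ladder accumulating into n with a single validity check via set difference and a closed-form arithmetic combination of the four direction counts.
import Mathlib
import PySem

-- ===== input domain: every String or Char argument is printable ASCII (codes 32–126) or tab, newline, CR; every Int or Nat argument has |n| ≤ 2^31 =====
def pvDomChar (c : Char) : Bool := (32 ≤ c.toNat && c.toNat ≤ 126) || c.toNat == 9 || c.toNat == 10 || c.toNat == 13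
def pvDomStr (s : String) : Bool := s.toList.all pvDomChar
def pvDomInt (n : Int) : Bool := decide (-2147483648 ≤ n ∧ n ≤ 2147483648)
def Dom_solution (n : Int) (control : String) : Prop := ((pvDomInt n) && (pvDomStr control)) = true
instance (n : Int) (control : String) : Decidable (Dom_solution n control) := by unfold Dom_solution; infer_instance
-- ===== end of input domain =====

-- B validates with a set difference then returns the closed form n + #w - #s + 10*#d - 10*#a;
-- Pre_ excludes control strings with a character outside {w,s,d,a}, on which both Pythons raise
-- the same Exception. Return-value equivalence only (neither program mutates its arguments).

-- ===== PORT A =====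
-- the for-loop over control, updating n per character; the else-branch raises in Python
-- (excluded by Pre_), here it stops and returns the current n
def solutionLoop (n : Int) : List Char → Int
  | [] => n
  | c :: rest =>
    if c = 'w' then solutionLoop (n + 1) rest
    else if c = 's' then solutionLoop (n + -1) rest
    else if c = 'd' then solutionLoop (n + 10) rest
    else if c = 'a' then solutionLoop (n + -10) rest
    else n  -- Python: raise Exception(...); outside Pre_

def solution (n : Int) (control : String) : Int :=
  solutionLoop n control.toList

-- ===== PORT B =====
def solution_alt (n : Int) (control : String) : Int :=
  if PySem.Set.diff (PySem.Set.ofList control.toList) ['w', 's', 'd', 'a'] ≠ [] then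
    n  -- Python: raise Exception(...); outside Pre_
  else
    n + (PySem.Str.count control "w" : Int) - (PySem.Str.count control "s" : Int)
      + 10 * (PySem.Str.count control "d" : Int) - 10 * (PySem.Str.count control "a" : Int)

-- ===== PRECONDITION & SPEC =====
-- Pre_ excludes exactly the inputs where A (and B) raise: a character outside {w,s,d,a}
def Pre_solution (n : Int) (control : String) : Prop :=
  control.toList.all (fun c => c == 'w' || c == 's' || c == 'd' || c == 'a') = true
instance (n : Int) (control : String) : Decidable (Pre_solution n control) := by
  unfold Pre_solution; infer_instance

def pvWitness_solution : Int × String := (0, "wsda")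

def Spec_solution (n : Int) (control : String) (out : Int) : Prop := out = solution_alt n control
instance (n : Int) (control : String) (out : Int) : Decidable (Spec_solution n control out) := by
  unfold Spec_solution; infer_instance

-- ===== CLAIM (what is proved, stated in full; the proofs are below) =====
def Claim_equal_solution : Prop := ∀ (n : Int) (control : String),
  Dom_solution n control → Pre_solution n control → Spec_solution n control (solution n control)

-- ===== LEMMAS AND PROOFS =====

theorem count_go_single (v : Char) (l : List Char) : ∀ (fuel acc : Nat), l.length ≤ fuel →
    PySem.Chars.count.go [v] fuel l acc = acc + l.count v := by
  induction l with
  | nil => intro fuel acc _; cases fuel <;> simp [PySem.Chars.count.go]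
  | cons c t ih =>
    intro fuel acc h
    cases fuel with
    | zero => simp at h
    | succ f =>
      simp only [PySem.Chars.count.go]
      by_cases hv : v = c
      · subst hv; simp [List.isPrefixOf, ih f (acc + 1) (by simpa using h)]; omega
      · simp [List.isPrefixOf, hv, Ne.symm hv, ih f acc (by simpa using h)]

theorem count_single (v : Char) (l : List Char) :
    PySem.Chars.count l [v] = l.count v := by
  simp [PySem.Chars.count, count_go_single v l l.length 0 l.length.le_refl]

theorem solutionLoop_closed (l : List Char)
    (h : ∀ c ∈ l, c = 'w' ∨ c = 's' ∨ c = 'd' ∨ c = 'a') (n : Int) :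
    solutionLoop n l =
      n + (l.count 'w' : Int) - (l.count 's' : Int)
        + 10 * (l.count 'd' : Int) - 10 * (l.count 'a' : Int) := by
  induction l generalizing n with
  | nil => simp [solutionLoop]
  | cons c rest ih =>
    have hc := h c (by simp)
    have hrest : ∀ x ∈ rest, x = 'w' ∨ x = 's' ∨ x = 'd' ∨ x = 'a' :=
      fun x hx => h x (by simp [hx])
    rcases hc with rfl | rfl | rfl | rfl <;>
      simp [solutionLoop, ih hrest] <;> ring

theorem diff_nil_of_valid (l : List Char)
    (h : ∀ c ∈ l, c = 'w' ∨ c = 's' ∨ c = 'd' ∨ c = 'a') :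
    PySem.Set.diff (PySem.Set.ofList l) ['w', 's', 'd', 'a'] = [] := by
  rw [List.eq_nil_iff_forall_not_mem]
  intro c hc
  have hmem : c ∈ PySem.Set.ofList l := by
    have := PySem.Set.mem_diff (s := PySem.Set.ofList l) (t := ['w', 's', 'd', 'a']) (y := c)
    exact (this.mp hc).1
  have hnot : c ∉ (['w', 's', 'd', 'a'] : List Char) := by
    have := PySem.Set.mem_diff (s := PySem.Set.ofList l) (t := ['w', 's', 'd', 'a']) (y := c)
    exact (this.mp hc).2
  have := h c ((PySem.Set.mem_ofList (xs := l) (y := c)).mp hmem)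
  rcases this with rfl | rfl | rfl | rfl <;> simp at hnot

-- ===== VERDICT (by name: the statement is the Claim_ definition above) =====
theorem solution_spec : Claim_equal_solution := by
  intro n control _ hpre0
  have hpre : ∀ c ∈ control.toList, c = 'w' ∨ c = 's' ∨ c = 'd' ∨ c = 'a' := by
    intro c hc
    have h2 := List.all_eq_true.mp hpre0 c hc
    simp at h2
    tauto
  unfold Spec_solution solution solution_alt
  rw [if_neg (by simp [diff_nil_of_valid _ hpre])]
  have hcw : PySem.Str.count control "w" = control.toList.count 'w' := by
    simp [PySem.Str.count_eq]; exact count_single _ _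
  have hcs : PySem.Str.count control "s" = control.toList.count 's' := by
    simp [PySem.Str.count_eq]; exact count_single _ _
  have hcd : PySem.Str.count control "d" = control.toList.count 'd' := by
    simp [PySem.Str.count_eq]; exact count_single _ _
  have hca : PySem.Str.count control "a" = control.toList.count 'a' := by
    simp [PySem.Str.count_eq]; exact count_single _ _
  rw [hcw, hcs, hcd, hca, solutionLoop_closed _ hpre]
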